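-- pv_equiv track=rewrite | github.com/Alecrow/Pokemon | debug_route9.py | build_passable_and_labels
-- ===== SOURCE A (Python) =====
-- def build_passable_and_labels(grid):
--     R = len(grid)
--     C = max((len(r) for r in grid), default=0)
--     passable = [[0]*C for _ in range(R)]
--     labels = {}
--     for r in range(R):
--         for c in range(len(grid[r])):
--             val = grid[r][c]
--             if val == "1":
--                 passable[r][c] = 1
--             elif val == "0" or val == "":
--                 passable[r][c] = 0
--             else:
--                 labels.setdefault(val, []).append((r, c))
--                 passable[r][c] = 1
--     return passable, labels
-- ===== SOURCE B (Python) =====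
-- def build_passable_and_labels(grid):
--     C = max((len(r) for r in grid), default=0)
--     passable = [[0 if v in ("0", "") else 1 for v in row] + [0] * (C - len(row))
--                 for row in grid]
--     cells = [(v, (r, c))
--              for r, row in enumerate(grid)
--              for c, v in enumerate(row)
--              if v not in ("1", "0", "")]
--     order = list(dict.fromkeys(v for v, _ in cells))
--     labels = {v: [p for w, p in cells if w == v] for v in order}
--     return passable, labels
-- ===== Notes on version B (the rewrite author's own statement) =====
-- stated objective: alternative
-- what changed: A's single pass that mutates a preallocated zero matrix and grows a setdefault dict is replaced by a dict-free staged pipeline: rows are mapped to 0/1 values and padded to width C, all labelled cells are flattened into one (value, position) event list, keys are deduped in first-occurrence order, and each key's positions are gathered by filtering the event list.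
import Mathlib
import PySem

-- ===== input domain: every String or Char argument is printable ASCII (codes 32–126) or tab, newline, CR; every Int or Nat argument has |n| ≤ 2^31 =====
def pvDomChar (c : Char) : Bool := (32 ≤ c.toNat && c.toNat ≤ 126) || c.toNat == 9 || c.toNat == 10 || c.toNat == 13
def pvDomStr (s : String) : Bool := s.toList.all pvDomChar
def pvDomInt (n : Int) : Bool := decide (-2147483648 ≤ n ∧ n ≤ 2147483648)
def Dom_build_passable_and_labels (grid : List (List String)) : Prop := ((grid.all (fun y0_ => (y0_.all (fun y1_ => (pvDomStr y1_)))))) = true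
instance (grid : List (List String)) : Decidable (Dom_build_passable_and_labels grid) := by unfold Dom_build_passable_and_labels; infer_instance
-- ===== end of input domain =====

-- B replaces A's single mutating pass (preallocated zero matrix + setdefault dict) by a
-- dict-free staged pipeline: map each row to its 0/1 values and pad, flatten all labelled
-- cells into one event list, dedup its keys, and group positions per key by filtering
-- (objective: alternative; no speed claim).

-- ===== PORT A =====
-- labels.setdefault(val, []).append((r, c)) is Dict.modify val [] (· ++ [(r, c)]) (same
-- position rule: existing key updated in place, new key appended).  C ≥ 0 always (max of
-- lengths with default 0), so [0]*C is List.replicate C.toNat 0 exactly; the loop indices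
-- r, c are produced by range so they are nonnegative and r.toNat/c.toNat is exact.
def build_passable_and_labels (grid : List (List String)) : List (List Int) × (List (String × List (Int × Int))) :=
  let R : Int := grid.length
  let C : Int := (PySem.List.max? (grid.map (fun r => (r.length : Int))) (fun x => x)).getD 0
  let passable : List (List Int) := (PySem.List.pyRange 0 R).map (fun _ => List.replicate C.toNat 0)
  let final := (PySem.List.pyRange 0 R).foldl (fun st r =>
      (PySem.List.pyRange 0 ((PySem.List.pyGetD grid r []).length : Int)).foldl
        (fun (st : List (List Int) × PySem.Dict String (List (Int × Int))) c =>
          let val := PySem.List.pyGetD (PySem.List.pyGetD grid r []) c ""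
          if val = "1" then
            (st.1.modify r.toNat (fun row => row.set c.toNat 1), st.2)
          else if val = "0" ∨ val = "" then
            (st.1.modify r.toNat (fun row => row.set c.toNat 0), st.2)
          else
            (st.1.modify r.toNat (fun row => row.set c.toNat 1),
             st.2.modify val [] (fun l => l ++ [(r, c)]))) st)
    (passable, (PySem.Dict.empty : PySem.Dict String (List (Int × Int))))
  (final.1, final.2.items)

-- ===== PORT B =====
-- [0]*(C-len(row)) is List.replicate (C - len row).toNat 0 (exact: Python's n*[0] is empty
-- for n ≤ 0, as .toNat gives); dict.fromkeys dedup is PySem.List.dedup; the dict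
-- comprehension over the deduped keys is a map producing the association list directly.
def build_passable_and_labels_alt (grid : List (List String)) : List (List Int) × (List (String × List (Int × Int))) :=
  let C : Int := (PySem.List.max? (grid.map (fun r => (r.length : Int))) (fun x => x)).getD 0
  let passable : List (List Int) := grid.map (fun row =>
    row.map (fun v => if v = "0" ∨ v = "" then (0 : Int) else 1)
      ++ List.replicate (C - (row.length : Int)).toNat (0 : Int))
  let cells : List (String × (Int × Int)) :=
    (PySem.List.enumerate grid).flatMap (fun p =>
      ((PySem.List.enumerate p.2).filter
          (fun q => decide (q.2 ≠ "1" ∧ q.2 ≠ "0" ∧ q.2 ≠ ""))).map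
        (fun q => (q.2, (p.1, q.1))))
  let order : List String := PySem.List.dedup (cells.map (fun p => p.1))
  let labels : List (String × List (Int × Int)) :=
    order.map (fun v => (v, (cells.filter (fun p => p.1 == v)).map (fun p => p.2)))
  (passable, labels)

-- ===== PRECONDITION & SPEC =====
def Spec_build_passable_and_labels (grid : List (List String)) (out : List (List Int) × (List (String × List (Int × Int)))) : Prop := out = build_passable_and_labels_alt grid
instance (grid : List (List String)) (out : List (List Int) × (List (String × List (Int × Int)))) : Decidable (Spec_build_passable_and_labels grid out) := by unfold Spec_build_passable_and_labels; infer_instance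

-- ===== CLAIM (what is proved, stated in full; the proofs are below) =====
def Claim_equal_build_passable_and_labels : Prop := ∀ (grid : List (List String)), Dom_build_passable_and_labels grid → Spec_build_passable_and_labels grid (build_passable_and_labels grid)

-- ===== LEMMAS AND PROOFS =====

-- proof-side abbreviations for the two independent components of A's loop body
def pvStepP (row : List String) (rt : Nat) (P : List (List Int)) (c : Int) : List (List Int) :=
  P.modify rt (fun rw => rw.set c.toNat
    (if PySem.List.pyGetD row c "" = "0" ∨ PySem.List.pyGetD row c "" = "" then 0 else 1))

def pvStepL (row : List String) (r : Int) (d : PySem.Dict String (List (Int × Int))) (c : Int) :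
    PySem.Dict String (List (Int × Int)) :=
  let val := PySem.List.pyGetD row c ""
  if val ≠ "1" ∧ val ≠ "0" ∧ val ≠ "" then d.modify val [] (fun l => l ++ [(r, c)]) else d

theorem pv_foldl_pair {ι α β : Type} (l : List ι) (f : α → ι → α) (g : β → ι → β) (s : α × β) :
    l.foldl (fun st i => (f st.1 i, g st.2 i)) s = (l.foldl f s.1, l.foldl g s.2) := by
  simpa using PySem.List.foldl_prod_mk f g l s.1 s.2

theorem pv_body_eq (row : List String) (r : Int) :
    (fun (st : List (List Int) × PySem.Dict String (List (Int × Int))) (c : Int) =>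
      if PySem.List.pyGetD row c "" = "1" then
        (st.1.modify r.toNat (fun rw => rw.set c.toNat 1), st.2)
      else if PySem.List.pyGetD row c "" = "0" ∨ PySem.List.pyGetD row c "" = "" then
        (st.1.modify r.toNat (fun rw => rw.set c.toNat 0), st.2)
      else
        (st.1.modify r.toNat (fun rw => rw.set c.toNat 1),
         st.2.modify (PySem.List.pyGetD row c "") [] (fun l => l ++ [(r, c)])))
    = (fun st c => (pvStepP row r.toNat st.1 c, pvStepL row r st.2 c)) := by
  funext st c
  simp only [pvStepP, pvStepL]
  by_cases h1 : PySem.List.pyGetD row c "" = "1"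
  · simp [h1]
  · by_cases h0 : PySem.List.pyGetD row c "" = "0" ∨ PySem.List.pyGetD row c "" = ""
    · rcases h0 with h0 | h0 <;> simp [h0]
    · push Not at h0
      simp [h1, h0.1, h0.2]

theorem pv_modify_modify {α : Type} : ∀ (l : List α) (i : Nat) (f g : α → α),
    (l.modify i f).modify i g = l.modify i (fun a => g (f a)) := by
  intro l
  induction l with
  | nil => intro i f g; simp
  | cons x t ih =>
    intro i f g
    cases i with
    | zero => simp
    | succ n => simp [ih]

theorem pv_modify_id {α : Type} : ∀ (l : List α) (i : Nat), l.modify i (fun a => a) = l := by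
  intro l
  induction l with
  | nil => intro i; simp
  | cons x t ih => intro i; cases i <;> simp [ih]

-- a fold whose every step modifies the SAME index is one modify of the composed function
theorem pv_foldl_modify {ι α : Type} (l : List ι) (i : Nat) (g : ι → α → α) :
    ∀ (P : List α), l.foldl (fun P x => P.modify i (g x)) P
      = P.modify i (fun a => l.foldl (fun a x => g x a) a) := by
  induction l with
  | nil => intro P; simp [pv_modify_id]
  | cons x t ih => intro P; simp [ih, pv_modify_modify]

theorem pv_modify_append_cons {α : Type} (f : α → α) (z : α) (suf : List α) :
    ∀ (pre : List α), (pre ++ z :: suf).modify pre.length f = pre ++ f z :: suf := by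
  intro pre
  induction pre with
  | nil => simp
  | cons x t ih => simpa using ih

-- writing rows 0..n-1 of pre ++ replicate n z in increasing order replaces the suffix
theorem pv_outer_fold (G : Nat → List Int → List Int) (z : List Int) :
    ∀ (n : Nat) (pre : List (List Int)),
      (List.range' pre.length n).foldl (fun P r => P.modify r (G r)) (pre ++ List.replicate n z)
        = pre ++ (List.range' pre.length n).map (fun r => G r z) := by
  intro n
  induction n with
  | zero => intro pre; simp
  | succ m ih =>
    intro pre
    rw [List.range'_succ, List.foldl_cons, List.replicate_succ, pv_modify_append_cons]
    have := ih (pre ++ [G pre.length z])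
    simp only [List.length_append, List.length_cons, List.length_nil, Nat.zero_add,
      List.append_assoc, List.cons_append, List.nil_append] at this ⊢
    simpa using this

-- the sequential writes of one row into a row of zeros, characterised elementwise
theorem pv_write_length (w : Nat → Int) :
    ∀ (n : Nat) (o : List Int),
      ((List.range n).foldl (fun o c => o.set c (w c)) o).length = o.length := by
  intro n
  induction n with
  | zero => intro o; simp
  | succ m ih => intro o; simp [List.range_succ, ih]

theorem pv_write_getElem (w : Nat → Int) :
    ∀ (n : Nat) (o : List Int) (j : Nat) (hj : j < o.length),
      ((List.range n).foldl (fun o c => o.set c (w c)) o)[j]'(by rw [pv_write_length]; exact hj)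
        = if j < n then w j else o[j] := by
  intro n
  induction n with
  | zero => intro o j hj; simp
  | succ m ih =>
    intro o j hj
    simp only [List.range_succ, List.foldl_append, List.foldl_cons, List.foldl_nil]
    rw [List.getElem_set]
    by_cases hm : m = j
    · subst hm
      simp
    · rw [if_neg hm, ih o j hj]
      by_cases h2 : j < m
      · simp [h2, Nat.lt_succ_of_lt h2]
      · have h3 : ¬ j < m + 1 := by omega
        simp [h2, h3]

-- A's written row on a zero row of width C, characterised as a map over range C
theorem pv_row_eq (row : List String) (C : Nat) :
    (List.range row.length).foldl
        (fun o c => o.set c (if row.getD c "" = "0" ∨ row.getD c "" = "" then 0 else 1))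
        (List.replicate C (0 : Int))
      = (List.range C).map (fun c =>
          if row.length ≤ c ∨ row.getD c "" = "0" ∨ row.getD c "" = "" then (0 : Int) else 1) := by
  apply List.ext_getElem
  · simp [pv_write_length]
  · intro j h1 h2
    have hjC : j < C := by simpa [pv_write_length] using h1
    rw [pv_write_getElem _ row.length (List.replicate C (0:Int)) j (by simpa using hjC)]
    rw [List.getElem_map, List.getElem_range]
    by_cases hlen : j < row.length
    · have : ¬ row.length ≤ j := Nat.not_le.mpr hlen
      simp [hlen, this]
    · have : row.length ≤ j := Nat.le_of_not_lt hlen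
      simp [hlen, this]

-- that map over range C is B's mapped-and-padded row, when the row fits the width
theorem pv_row_pad (row : List String) (C : Nat) (h : row.length ≤ C) :
    (List.range C).map (fun c =>
        if row.length ≤ c ∨ row.getD c "" = "0" ∨ row.getD c "" = "" then (0 : Int) else 1)
      = row.map (fun v => if v = "0" ∨ v = "" then (0 : Int) else 1)
          ++ List.replicate (C - row.length) 0 := by
  apply List.ext_getElem
  · simp; omega
  · intro j h1 h2
    have hjC : j < C := by simpa using h1
    rw [List.getElem_map, List.getElem_range]
    by_cases hlen : j < row.length
    · have hnle : ¬ row.length ≤ j := Nat.not_le.mpr hlen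
      rw [List.getElem_append_left (by simpa using hlen)]
      simp [hnle, List.getElem?_eq_getElem hlen]
    · have hle : row.length ≤ j := Nat.le_of_not_lt hlen
      rw [List.getElem_append_right (by simpa using hle)]
      simp [hle]

-- pyRange 0 n over a Nat bound, as a Nat-range fold
theorem pv_foldl_pyRange_nat {α : Type} (n : Nat) (f : α → Int → α) (a : α) :
    (PySem.List.pyRange 0 (n : Int)).foldl f a = (List.range n).foldl (fun a (k : Nat) => f a (k : Int)) a := by
  rw [PySem.List.pyRange_one, List.foldl_map]
  simp only [Int.sub_zero, Int.toNat_natCast, zero_add]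

theorem pv_C_nonneg (grid : List (List String)) :
    0 ≤ (PySem.List.max? (grid.map (fun r => (r.length : Int))) (fun x => x)).getD 0 := by
  cases hm : PySem.List.max? (grid.map (fun r => (r.length : Int))) (fun x => x) with
  | none => simp
  | some m =>
    have hmem := PySem.List.max?_mem hm
    simp only [List.mem_map] at hmem
    obtain ⟨r, _, hr⟩ := hmem
    simp [← hr]

-- every row of the grid fits the width C = max(len(r) for r in grid)
theorem pv_len_le_C (grid : List (List String)) (row : List String) (h : row ∈ grid) :
    (row.length : Int) ≤ (PySem.List.max? (grid.map (fun r => (r.length : Int))) (fun x => x)).getD 0 := by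
  cases hm : PySem.List.max? (grid.map (fun r => (r.length : Int))) (fun x => x) with
  | none =>
    exfalso
    have : ((row.length : Int) ∈ grid.map (fun r => (r.length : Int))) := List.mem_map_of_mem h
    rw [PySem.List.max?_eq_none_iff] at hm
    simp [hm] at this
  | some m =>
    have := PySem.List.max?_isMax hm (row.length : Int) (List.mem_map_of_mem h)
    simpa using this

-- the outer loop's state is a pair whose components evolve independently; split it
theorem pv_split (grid : List (List String)) (l : List Int)
    (s : List (List Int) × PySem.Dict String (List (Int × Int))) :
    l.foldl (fun st r =>
        (List.foldl (pvStepP (PySem.List.pyGetD grid r []) r.toNat) st.1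
            (PySem.List.pyRange 0 ((PySem.List.pyGetD grid r []).length : Int)),
         List.foldl (pvStepL (PySem.List.pyGetD grid r []) r) st.2
            (PySem.List.pyRange 0 ((PySem.List.pyGetD grid r []).length : Int)))) s
      = (l.foldl (fun P r => List.foldl (pvStepP (PySem.List.pyGetD grid r []) r.toNat) P
            (PySem.List.pyRange 0 ((PySem.List.pyGetD grid r []).length : Int))) s.1,
         l.foldl (fun d r => List.foldl (pvStepL (PySem.List.pyGetD grid r []) r) d
            (PySem.List.pyRange 0 ((PySem.List.pyGetD grid r []).length : Int))) s.2) :=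
  pv_foldl_pair l
    (fun P r => List.foldl (pvStepP (PySem.List.pyGetD grid r []) r.toNat) P
      (PySem.List.pyRange 0 ((PySem.List.pyGetD grid r []).length : Int)))
    (fun d r => List.foldl (pvStepL (PySem.List.pyGetD grid r []) r) d
      (PySem.List.pyRange 0 ((PySem.List.pyGetD grid r []).length : Int))) s

-- A's passable fold (already split off, over Nat indices) equals the range-C row form
theorem pv_pass_eq (grid : List (List String)) (C : Nat) :
    (List.range grid.length).foldl
        (fun P r => (List.range (grid.getD r []).length).foldl
          (fun P c => P.modify r (fun rw => rw.set c
            (if (grid.getD r []).getD c "" = "0" ∨ (grid.getD r []).getD c "" = "" then 0 else 1))) P)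
        (List.replicate grid.length (List.replicate C (0 : Int)))
      = grid.map (fun row => (List.range C).map (fun c =>
          if row.length ≤ c ∨ row.getD c "" = "0" ∨ row.getD c "" = "" then (0 : Int) else 1)) := by
  have hstep : ∀ (P : List (List Int)) (r : Nat),
      (List.range (grid.getD r []).length).foldl
          (fun P c => P.modify r (fun rw => rw.set c
            (if (grid.getD r []).getD c "" = "0" ∨ (grid.getD r []).getD c "" = "" then 0 else 1))) P
        = P.modify r (fun old => (List.range (grid.getD r []).length).foldl
            (fun o c => o.set c
              (if (grid.getD r []).getD c "" = "0" ∨ (grid.getD r []).getD c "" = "" then 0 else 1)) old) := by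
    intro P r
    exact pv_foldl_modify _ r _ P
  calc (List.range grid.length).foldl _ _
      = (List.range' 0 grid.length).foldl
          (fun P r => P.modify r (fun old => (List.range (grid.getD r []).length).foldl
            (fun o c => o.set c
              (if (grid.getD r []).getD c "" = "0" ∨ (grid.getD r []).getD c "" = "" then 0 else 1)) old))
          ([] ++ List.replicate grid.length (List.replicate C (0 : Int))) := by
        rw [List.range_eq_range']
        simp only [List.nil_append]
        exact PySem.List.foldl_congr_mem _ _ _ _ (by intro P r hr; exact hstep P r)
    _ = [] ++ (List.range' 0 grid.length).map (fun r => (List.range (grid.getD r []).length).foldl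
            (fun o c => o.set c
              (if (grid.getD r []).getD c "" = "0" ∨ (grid.getD r []).getD c "" = "" then 0 else 1))
            (List.replicate C (0 : Int))) := by
        exact pv_outer_fold _ _ grid.length []
    _ = grid.map (fun row => (List.range C).map (fun c =>
          if row.length ≤ c ∨ row.getD c "" = "0" ∨ row.getD c "" = "" then (0 : Int) else 1)) := by
        rw [List.nil_append, ← List.range_eq_range']
        apply List.ext_getElem
        · simp
        · intro j h1 h2
          simp only [List.getElem_map, List.getElem_range]
          have hj : j < grid.length := by simpa using h1
          have hget : grid.getD j [] = grid[j] := List.getD_eq_getElem grid [] hj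
          rw [hget, pv_row_eq grid[j] C]

-- a loop of loops over a list of lists is one loop over the flattened list
theorem pv_foldl_flatMap {α β γ : Type} (l : List α) (E : α → List β) (f : γ → β → γ) :
    ∀ (i : γ), l.foldl (fun a x => (E x).foldl f a) i = (l.flatMap E).foldl f i := by
  induction l with
  | nil => intro i; rfl
  | cons x t ih => intro i; simp [List.foldl_append, ih]

-- the label events of one row, as B's comprehension produces them
def pvEv (p : Int × List String) : List (String × (Int × Int)) :=
  ((PySem.List.enumerate p.2).filter
      (fun q => decide (q.2 ≠ "1" ∧ q.2 ≠ "0" ∧ q.2 ≠ ""))).map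
    (fun q => (q.2, (p.1, q.1)))

-- A's inner label loop over column indices is the event-list loop of that row
theorem pv_inner_labels (row : List String) (r : Int) (d : PySem.Dict String (List (Int × Int))) :
    (PySem.List.pyRange 0 ((row.length : Nat) : Int)).foldl (pvStepL row r) d
      = (pvEv (r, row)).foldl (fun d p => d.modify p.1 [] (fun l => l ++ [p.2])) d := by
  have henum := PySem.List.enumerate_eq_map_pyRange row ""
  calc (PySem.List.pyRange 0 ((row.length : Nat) : Int)).foldl (pvStepL row r) d
      = (PySem.List.enumerate row).foldl
          (fun d q => if q.2 ≠ "1" ∧ q.2 ≠ "0" ∧ q.2 ≠ "" then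
            d.modify q.2 [] (fun l => l ++ [(r, q.1)]) else d) d := by
        rw [henum, List.foldl_map]
        simp only [PySem.List.len_eq]
        rfl
    _ = ((PySem.List.enumerate row).filter
          (fun q => decide (q.2 ≠ "1" ∧ q.2 ≠ "0" ∧ q.2 ≠ ""))).foldl
          (fun d q => d.modify q.2 [] (fun l => l ++ [(r, q.1)])) d := by
        exact PySem.List.foldl_ite_eq_foldl_filter _ _ _ _
    _ = (pvEv (r, row)).foldl (fun d p => d.modify p.1 [] (fun l => l ++ [p.2])) d := by
        unfold pvEv
        rw [List.foldl_map]

-- A's whole label loop is one fold over the flattened event list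
theorem pv_labels_eq (grid : List (List String)) :
    (PySem.List.pyRange 0 ((grid.length : Nat) : Int)).foldl
        (fun d r => (PySem.List.pyRange 0 (((PySem.List.pyGetD grid r []).length : Nat) : Int)).foldl
          (pvStepL (PySem.List.pyGetD grid r []) r) d)
        (PySem.Dict.empty : PySem.Dict String (List (Int × Int)))
      = (((PySem.List.enumerate grid).flatMap pvEv).foldl
          (fun d p => d.modify p.1 [] (fun l => l ++ [p.2])) PySem.Dict.empty) := by
  rw [← pv_foldl_flatMap]
  rw [PySem.List.enumerate_eq_map_pyRange grid [], List.foldl_map]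
  simp only [PySem.List.len_eq]
  apply PySem.List.foldl_congr_mem
  intro d r _
  exact pv_inner_labels (PySem.List.pyGetD grid r []) r d

-- the grouped dict, read back as ordered keys with their filtered position lists
theorem pv_group_eq (cells : List (String × (Int × Int))) :
    ((cells.foldl (fun d p => d.modify p.1 [] (fun l => l ++ [p.2]))
        (PySem.Dict.empty : PySem.Dict String (List (Int × Int)))).items)
      = (PySem.Set.ofList (cells.map (fun p => p.1))).map
          (fun v => (v, (cells.filter (fun p => p.1 == v)).map (fun p => p.2))) := by
  have hnd : ((cells.foldl (fun d p => d.modify p.1 [] (fun l => l ++ [p.2]))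
      (PySem.Dict.empty : PySem.Dict String (List (Int × Int))))).keys.Nodup := by
    exact PySem.Dict.nodup_keys_foldl_modify_key cells (fun p => p.1) []
      (fun _ p => fun l => l ++ [p.2]) PySem.Dict.empty (by simp)
  rw [PySem.Dict.items_eq_map_keys _ hnd []]
  have hkeys : ((cells.foldl (fun d p => d.modify p.1 [] (fun l => l ++ [p.2]))
      (PySem.Dict.empty : PySem.Dict String (List (Int × Int))))).keys
      = PySem.Set.ofList (cells.map (fun p => p.1)) := by
    have := PySem.Dict.keys_foldl_modify_key cells (fun p => p.1) []
      (fun _ p => fun l => l ++ [p.2]) (PySem.Dict.empty : PySem.Dict String (List (Int × Int)))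
    simpa [PySem.Set.update_empty] using this
  rw [hkeys]
  apply List.map_congr_left
  intro v _
  have := PySem.Dict.getD_foldl_modify_append cells
    (PySem.Dict.empty : PySem.Dict String (List (Int × Int))) v
  simp only [PySem.Dict.getD_empty, List.nil_append] at this
  rw [this]

-- ===== VERDICT (by name: the statement is the Claim_ definition above) =====
theorem build_passable_and_labels_spec : Claim_equal_build_passable_and_labels := by
  intro grid _
  unfold Spec_build_passable_and_labels build_passable_and_labels build_passable_and_labels_alt
  set Cint : Int := (PySem.List.max? (grid.map (fun r => (r.length : Int))) (fun x => x)).getD 0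
    with hCdef
  have hC0 : (0 : Int) ≤ Cint := pv_C_nonneg grid
  simp only [pv_body_eq, pv_foldl_pair]
  rw [pv_split]
  simp only [Prod.mk.injEq]
  constructor
  · -- the passable matrices agree
    simp only [pv_foldl_pyRange_nat, PySem.List.pyGetD_natCast,
      Int.toNat_natCast, pvStepP, List.map_const', PySem.List.length_pyRange_one, Int.sub_zero]
    rw [pv_pass_eq grid Cint.toNat]
    apply List.map_congr_left
    intro row hrow
    have hle : row.length ≤ Cint.toNat := by
      have := pv_len_le_C grid row hrow
      omega
    rw [pv_row_pad row Cint.toNat hle]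
    have : Cint.toNat - row.length = (Cint - (row.length : Int)).toNat := by omega
    rw [this]
  · -- the labels agree
    simp only [pv_foldl_pyRange_nat]
    have hA := pv_labels_eq grid
    simp only [pv_foldl_pyRange_nat] at hA
    rw [hA]
    rw [pv_group_eq]
    simp only [PySem.List.dedup_eq_ofList]
    rfl
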